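-- pv_equiv track=rewrite | github.com/ahaan1984/ai-cli-debugger | utils.py | truncate_pane_output
-- ===== SOURCE A (Python) =====
-- MAX_CHARS = 10000
--
-- def truncate_chars(text: str, reverse=False):
--     return text[-MAX_CHARS:] if reverse else text[:MAX_CHARS]
--
-- def truncate_pane_output(output):
--     hit_non_empty_line = False
--     lines = []
--     for line in reversed(output.splitlines()):
--         if line and line.strip():
--             hit_non_empty_line = True
--
--         if hit_non_empty_line:
--             lines.append(line)
--
--     lines = lines[1:]
--     output = '\n'.join(reversed(lines))
--     output = truncate_chars(output, reverse=True)
--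
--     return output.strip()
-- ===== SOURCE B (Python) =====
-- MAX_CHARS = 10000
--
-- def truncate_chars(text: str, reverse=False):
--     return text[-MAX_CHARS:] if reverse else text[:MAX_CHARS]
--
-- def truncate_pane_output(output):
--     lines = output.splitlines()
--     last = -1
--     for i, line in enumerate(lines):
--         if line.strip():
--             last = i
--     text = '\n'.join(lines[:last]) if last >= 0 else ''
--     return truncate_chars(text, reverse=True).strip()
-- ===== Notes on version B (the rewrite author's own statement) =====
-- stated objective: simpler
-- what changed: Replaces A's reverse traversal with a hit flag, accumulate-then-drop-one and re-reverse by a single forward pass that records the index of the last non-blank line and slices lines[:last].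
import Mathlib
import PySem

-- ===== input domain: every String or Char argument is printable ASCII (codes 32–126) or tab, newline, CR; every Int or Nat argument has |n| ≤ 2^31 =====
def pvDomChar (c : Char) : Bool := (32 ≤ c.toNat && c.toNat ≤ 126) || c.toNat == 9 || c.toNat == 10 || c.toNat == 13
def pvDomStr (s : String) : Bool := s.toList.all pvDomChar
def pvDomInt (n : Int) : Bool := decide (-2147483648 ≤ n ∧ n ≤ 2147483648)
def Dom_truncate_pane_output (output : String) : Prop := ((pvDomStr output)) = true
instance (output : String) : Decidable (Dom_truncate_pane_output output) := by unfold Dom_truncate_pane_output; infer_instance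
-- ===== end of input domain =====

-- B replaces A's reverse-accumulate-with-flag-then-drop-one loop by a single forward pass
-- that finds the index of the last non-blank line and slices lines[:last] (objective: simpler).

-- ===== PORT A =====
def truncate_chars (text : String) (reverse : Bool) : String :=
  if reverse then PySem.Str.slice text (some (-10000)) none
  else PySem.Str.slice text none (some 10000)

def truncate_pane_output (output : String) : String :=
  let st := (PySem.Str.splitlines output).reverse.foldl
    (fun (st : Bool × List String) line =>
      let hit := st.1 || (decide (line ≠ "") && decide (PySem.Str.strip line ≠ ""))
      (hit, if hit then st.2 ++ [line] else st.2)) (false, [])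
  let lines := PySem.List.slice st.2 (some 1) none
  let out := PySem.Str.join "\n" lines.reverse
  PySem.Str.strip (truncate_chars out true)

-- ===== PORT B =====
def truncate_pane_output_alt (output : String) : String :=
  let lines := PySem.Str.splitlines output
  let last := (PySem.List.enumerate lines 0).foldl
    (fun (last : Int) p => if PySem.Str.strip p.2 ≠ "" then p.1 else last) (-1)
  let text := if last ≥ 0 then PySem.Str.join "\n" (PySem.List.slice lines none (some last)) else ""
  PySem.Str.strip (truncate_chars text true)

-- ===== PRECONDITION & SPEC =====
def Spec_truncate_pane_output (output : String) (out : String) : Prop := out = truncate_pane_output_alt output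
instance (output : String) (out : String) : Decidable (Spec_truncate_pane_output output out) := by unfold Spec_truncate_pane_output; infer_instance

-- ===== CLAIM (what is proved, stated in full; the proofs are below) =====
def Claim_equal_truncate_pane_output : Prop := ∀ (output : String), Dom_truncate_pane_output output → Spec_truncate_pane_output output (truncate_pane_output output)

-- ===== LEMMAS AND PROOFS =====

-- A's `line and line.strip()` test equals B's `line.strip()` test (strip "" = "").
lemma pv_cond_eq (l : String) :
    (decide (l ≠ "") && decide (PySem.Str.strip l ≠ "")) = decide (PySem.Str.strip l ≠ "") := by
  by_cases h : l = ""
  · subst h; decide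
  · simp [h]

-- abbreviations for the two loops (proof-side only)
def pvStep (st : Bool × List String) (line : String) : Bool × List String :=
  let hit := st.1 || decide (PySem.Str.strip line ≠ "")
  (hit, if hit then st.2 ++ [line] else st.2)

def pvLast (ls : List String) : Int :=
  (PySem.List.enumerate ls 0).foldl
    (fun (last : Int) p => if PySem.Str.strip p.2 ≠ "" then p.1 else last) (-1)

lemma pvStep_flag_true (rl : List String) (acc : List String) :
    rl.foldl pvStep (true, acc) = (true, acc ++ rl) := by
  induction rl generalizing acc with
  | nil => simp
  | cons x xs ih => simp [pvStep, ih]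

lemma pvLast_append (ds : List String) (x : String) :
    pvLast (ds ++ [x]) = if PySem.Str.strip x ≠ "" then (ds.length : Int) else pvLast ds := by
  unfold pvLast
  rw [PySem.List.enumerate_append, List.foldl_append]
  simp [PySem.List.enumerate_cons, PySem.List.enumerate_nil]

lemma pvLast_bounds (ls : List String) : -1 ≤ pvLast ls ∧ pvLast ls < ls.length := by
  induction ls using List.reverseRecOn with
  | nil => decide
  | append_singleton ds x ih =>
    rw [pvLast_append]
    split_ifs with h
    · simp
    · simp; omega

lemma pv_main (ls : List String) :
    ((ls.reverse.foldl pvStep (false, [])).2.tail).reverse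
      = (if pvLast ls ≥ 0 then ls.take (pvLast ls).toNat else []) := by
  induction ls using List.reverseRecOn with
  | nil => decide
  | append_singleton ds x ih =>
    rw [List.reverse_append]
    simp only [List.reverse_cons, List.reverse_nil, List.nil_append, List.singleton_append,
      List.foldl_cons]
    by_cases hp : PySem.Str.strip x ≠ ""
    · have h1 : pvStep (false, []) x = (true, [x]) := by simp [pvStep, hp]
      rw [h1, pvStep_flag_true, pvLast_append, if_pos hp]
      simp
    · have h1 : pvStep (false, []) x = (false, []) := by simp [pvStep, hp]
      rw [h1, pvLast_append, if_neg hp, ih]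
      by_cases hge : pvLast ds ≥ 0
      · rw [if_pos hge, if_pos hge]
        have hb := (pvLast_bounds ds).2
        rw [List.take_append_of_le_length (by omega)]
      · rw [if_neg hge, if_neg hge]

lemma pv_join_nil : PySem.Str.join "\n" ([] : List String) = "" := by decide

-- ===== VERDICT (by name: the statement is the Claim_ definition above) =====
theorem truncate_pane_output_spec : Claim_equal_truncate_pane_output := by
  intro output _
  unfold Spec_truncate_pane_output truncate_pane_output truncate_pane_output_alt
  simp only [pv_cond_eq]
  have hfold : (fun (st : Bool × List String) line =>
      (st.1 || decide (PySem.Str.strip line ≠ ""),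
        if st.1 || decide (PySem.Str.strip line ≠ "") then st.2 ++ [line] else st.2)) = pvStep := by
    funext st line; rfl
  rw [hfold]
  rw [PySem.List.slice_from_one]
  rw [pv_main (PySem.Str.splitlines output)]
  set ls := PySem.Str.splitlines output with hls
  have hlastB : List.foldl (fun (last : Int) p => if PySem.Str.strip p.2 ≠ "" then p.1 else last)
      (-1) (PySem.List.enumerate ls 0) = pvLast ls := rfl
  rw [hlastB]
  show PySem.Str.strip (truncate_chars (PySem.Str.join "\n"
      (if pvLast ls ≥ 0 then ls.take (pvLast ls).toNat else [])) true) = _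
  by_cases hge : pvLast ls ≥ 0
  · rw [if_pos hge, if_pos hge, PySem.List.slice_to _ hge]
  · rw [if_neg hge, if_neg hge, pv_join_nil]
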